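-- pv_equiv track=rewrite | github.com/frantrucco-deepvision/fran | bin/bookizer/bookizer.py | create_signature_numbering
-- ===== SOURCE A (Python) =====
-- def create_signature_numbering(start=1, sheets_per_signature=6):
--     Cs = [2 * i + 2 for i in range(sheets_per_signature)]
--     Ds = [4*sheets_per_signature - 1 - 2*i for i in range(sheets_per_signature)]
--     As = [i + 1 for i in Ds]
--     Bs = [i - 1 for i in Cs]
--
--     As = [i + (start - 1) for i in As]
--     Bs = [i + (start - 1) for i in Bs]
--     Cs = [i + (start - 1) for i in Cs]
--     Ds = [i + (start - 1) for i in Ds]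
--
--     result = []
--     for i in range(sheets_per_signature):
--         result.append(As[i])
--         result.append(Bs[i])
--         result.append(Cs[i])
--         result.append(Ds[i])
--
--     return result
-- ===== SOURCE B (Python) =====
-- def create_signature_numbering(start=1, sheets_per_signature=6):
--     n = sheets_per_signature
--
--     def page(j):
--         # closed-form page number for output position j
--         sheet, side = divmod(j, 4)
--         if side == 0:
--             return 4 * n + start - 1 - 2 * sheet
--         if side == 1:
--             return start + 2 * sheet
--         if side == 2:
--             return start + 2 * sheet + 1
--         return 4 * n + start - 2 - 2 * sheet
--
--     return [page(j) for j in range(4 * n)]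
-- ===== Notes on version B (the rewrite author's own statement) =====
-- stated objective: alternative
-- what changed: Replaced A's four staged intermediate lists plus an index-interleaving loop by a single comprehension over the 4n output positions, where each position j is mapped directly to its page number by a closed-form divmod(j,4) formula (no intermediate lists, no interleaving).
import Mathlib
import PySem

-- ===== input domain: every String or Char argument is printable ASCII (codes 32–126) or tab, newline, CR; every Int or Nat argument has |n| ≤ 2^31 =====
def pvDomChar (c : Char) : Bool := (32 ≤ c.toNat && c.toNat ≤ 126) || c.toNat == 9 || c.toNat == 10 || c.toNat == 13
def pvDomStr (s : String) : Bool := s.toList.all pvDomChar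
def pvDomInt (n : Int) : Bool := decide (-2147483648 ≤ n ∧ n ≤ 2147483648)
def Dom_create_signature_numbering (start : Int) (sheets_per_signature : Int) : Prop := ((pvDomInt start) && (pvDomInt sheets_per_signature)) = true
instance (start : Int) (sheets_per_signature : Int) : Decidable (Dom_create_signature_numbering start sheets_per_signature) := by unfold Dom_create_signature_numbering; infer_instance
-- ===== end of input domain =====

-- B replaces A's four staged lists and interleaving loop by a single closed-form map over output positions (position j ↦ its page number via divmod); alternative decomposition, same O(n) cost.

-- ===== PORT A =====
def create_signature_numbering (start : Int) (sheets_per_signature : Int) : List Int :=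
  let Cs := (PySem.List.pyRange 0 sheets_per_signature 1).map (fun i => 2 * i + 2)
  let Ds := (PySem.List.pyRange 0 sheets_per_signature 1).map (fun i => 4 * sheets_per_signature - 1 - 2 * i)
  let As := Ds.map (fun i => i + 1)
  let Bs := Cs.map (fun i => i - 1)
  let As := As.map (fun i => i + (start - 1))
  let Bs := Bs.map (fun i => i + (start - 1))
  let Cs := Cs.map (fun i => i + (start - 1))
  let Ds := Ds.map (fun i => i + (start - 1))
  -- indices i are always in range, so pyGetD's default is never used
  (PySem.List.pyRange 0 sheets_per_signature 1).foldl (fun result i =>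
    result ++ [PySem.List.pyGetD As i 0] ++ [PySem.List.pyGetD Bs i 0]
           ++ [PySem.List.pyGetD Cs i 0] ++ [PySem.List.pyGetD Ds i 0]) []

-- ===== PORT B =====
-- closed-form page number for output position j (Source B's inner 'page')
def csnPage (start n j : Int) : Int :=
  let sheet := PySem.Int.floordiv j 4
  let side := PySem.Int.mod j 4
  if side = 0 then 4 * n + start - 1 - 2 * sheet
  else if side = 1 then start + 2 * sheet
  else if side = 2 then start + 2 * sheet + 1
  else 4 * n + start - 2 - 2 * sheet

def create_signature_numbering_alt (start : Int) (sheets_per_signature : Int) : List Int :=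
  (PySem.List.pyRange 0 (4 * sheets_per_signature) 1).map (csnPage start sheets_per_signature)

-- ===== PRECONDITION & SPEC =====
def Spec_create_signature_numbering (start : Int) (sheets_per_signature : Int) (out : List Int) : Prop := out = create_signature_numbering_alt start sheets_per_signature
instance (start : Int) (sheets_per_signature : Int) (out : List Int) : Decidable (Spec_create_signature_numbering start sheets_per_signature out) := by unfold Spec_create_signature_numbering; infer_instance

-- ===== CLAIM (what is proved, stated in full; the proofs are below) =====
def Claim_equal_create_signature_numbering : Prop := ∀ (start : Int) (sheets_per_signature : Int), Dom_create_signature_numbering start sheets_per_signature → Spec_create_signature_numbering start sheets_per_signature (create_signature_numbering start sheets_per_signature)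

-- ===== LEMMAS AND PROOFS =====

theorem foldl_append4 {α β : Type} (f1 f2 f3 f4 : β → α) :
    ∀ (l : List β) (init : List α),
      l.foldl (fun acc x => acc ++ [f1 x] ++ [f2 x] ++ [f3 x] ++ [f4 x]) init
        = init ++ l.flatMap (fun x => [f1 x, f2 x, f3 x, f4 x]) := by
  intro l
  induction l with
  | nil => intro init; simp
  | cons x xs _ => intro init; simp [List.foldl_cons, List.flatMap]

theorem range_four_mul_map {α : Type} (f : Nat → α) :
    ∀ (m : Nat), (List.range (4 * m)).map f
      = (List.range m).flatMap (fun k => [f (4 * k), f (4 * k + 1), f (4 * k + 2), f (4 * k + 3)]) := by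
  intro m
  induction m with
  | zero => simp
  | succ m ih =>
    have h4 : 4 * (m + 1) = 4 * m + 1 + 1 + 1 + 1 := by omega
    rw [h4, List.range_succ, List.range_succ, List.range_succ, List.range_succ,
        List.range_succ, List.map_append, List.map_append, List.map_append,
        List.map_append, List.flatMap_append, ih]
    simp [List.flatMap]

theorem csnPage_at (start n : Int) (k r : Nat) (hr : r < 4) :
    csnPage start n ((4 * k + r : Nat) : Int)
      = if r = 0 then 4 * n + start - 1 - 2 * (k : Int)
        else if r = 1 then start + 2 * (k : Int)
        else if r = 2 then start + 2 * (k : Int) + 1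
        else 4 * n + start - 2 - 2 * (k : Int) := by
  have hdiv : PySem.Int.floordiv ((4 * k + r : Nat) : Int) ((4 : Nat) : Int)
      = (((4 * k + r) / 4 : Nat) : Int) := PySem.Int.floordiv_natCast _ _
  have hmod : PySem.Int.mod ((4 * k + r : Nat) : Int) ((4 : Nat) : Int)
      = (((4 * k + r) % 4 : Nat) : Int) := PySem.Int.mod_natCast _ _
  have hd : (4 * k + r) / 4 = k := by omega
  have hm : (4 * k + r) % 4 = r := by omega
  simp only [csnPage]
  norm_cast at hdiv hmod ⊢
  rw [hdiv, hmod, hd, hm]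
  interval_cases r <;> simp

theorem create_signature_numbering_spec : Claim_equal_create_signature_numbering := by
  intro start spp _
  unfold Spec_create_signature_numbering create_signature_numbering create_signature_numbering_alt
  rw [foldl_append4, List.nil_append]
  -- A's side: evaluate the four list lookups at each i of the range
  have hA : (PySem.List.pyRange 0 spp 1).flatMap
      (fun i => [PySem.List.pyGetD (((((PySem.List.pyRange 0 spp 1).map (fun i => 4 * spp - 1 - 2 * i)).map (fun i => i + 1)).map (fun i => i + (start - 1)))) i 0,
                 PySem.List.pyGetD (((((PySem.List.pyRange 0 spp 1).map (fun i => 2 * i + 2)).map (fun i => i - 1)).map (fun i => i + (start - 1)))) i 0,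
                 PySem.List.pyGetD (((PySem.List.pyRange 0 spp 1).map (fun i => 2 * i + 2)).map (fun i => i + (start - 1))) i 0,
                 PySem.List.pyGetD (((PySem.List.pyRange 0 spp 1).map (fun i => 4 * spp - 1 - 2 * i)).map (fun i => i + (start - 1))) i 0])
      = (PySem.List.pyRange 0 spp 1).flatMap
      (fun i => [4 * spp + start - 1 - 2 * i, start + 2 * i, start + 2 * i + 1,
                 4 * spp + start - 2 - 2 * i]) := by
    apply List.flatMap_congr
    intro i hi
    obtain ⟨h0, h1⟩ := (PySem.List.mem_pyRange_one).mp hi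
    simp only [List.map_map]
    rw [PySem.List.pyGetD_map_pyRange_of_nonneg _ _ _ _ h0 h1,
        PySem.List.pyGetD_map_pyRange_of_nonneg _ _ _ _ h0 h1,
        PySem.List.pyGetD_map_pyRange_of_nonneg _ _ _ _ h0 h1,
        PySem.List.pyGetD_map_pyRange_of_nonneg _ _ _ _ h0 h1]
    simp only [Function.comp, List.cons.injEq, and_true]
    refine ⟨by ring, by ring, by ring, by ring⟩
  rw [hA]
  -- B's side: split the length-4n position range into groups of four
  have h4 : (4 * spp - 0).toNat = 4 * (spp - 0).toNat := by omega
  rw [PySem.List.pyRange_one 0 spp, PySem.List.pyRange_one 0 (4 * spp), h4,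
      List.map_map, range_four_mul_map, List.flatMap_map]
  apply List.flatMap_congr
  intro k _
  have e0 := csnPage_at start spp k 0 (by omega)
  have e1 := csnPage_at start spp k 1 (by omega)
  have e2 := csnPage_at start spp k 2 (by omega)
  have e3 := csnPage_at start spp k 3 (by omega)
  simp only [Function.comp]
  norm_num at e0 e1 e2 e3 ⊢
  rw [e0, e1, e2, e3]
  refine ⟨by ring, by ring, by ring, by ring⟩
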